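-- pv_equiv track=rewrite | github.com/bienvenu-cyber/tweetbot | instagram-sweet/artifacts/instagram-bot-api/instagram_errors.py | normalize_usernames
-- ===== SOURCE A (Python) =====
-- from typing import Iterable
--
-- def normalize_username(username: str) -> str:
--     return username.strip().lstrip("@").lower()
--
-- def normalize_usernames(usernames: Iterable[str]) -> list[str]:
--     normalized: list[str] = []
--     seen: set[str] = set()
--
--     for username in usernames:
--         clean = normalize_username(username)
--         if clean and clean not in seen:
--             normalized.append(clean)
--             seen.add(clean)
--
--     return normalized
-- ===== SOURCE B (Python) =====
-- def normalize_username(username: str) -> str: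
--     return username.strip().lstrip("@").lower()
--
-- def normalize_usernames(usernames):
--     # Stage 1: normalize and drop empties.
--     names = [c for c in (normalize_username(u) for u in usernames) if c]
--     # Stage 2: dedup by "keep the head, purge its later copies" (classic nub),
--     # no seen-set, no membership test.
--     out = []
--     while names:
--         head = names[0]
--         out.append(head)
--         names = [n for n in names[1:] if n != head]
--     return out
-- ===== Notes on version B (the rewrite author's own statement) =====
-- stated objective: alternative
-- what changed: B first builds the full list of non-empty normalized names, then deduplicates it by repeatedly emitting the head and filtering all its later copies out of the remainder (nub), instead of A's single pass with a seen-set and membership-test branch.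
import Mathlib
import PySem

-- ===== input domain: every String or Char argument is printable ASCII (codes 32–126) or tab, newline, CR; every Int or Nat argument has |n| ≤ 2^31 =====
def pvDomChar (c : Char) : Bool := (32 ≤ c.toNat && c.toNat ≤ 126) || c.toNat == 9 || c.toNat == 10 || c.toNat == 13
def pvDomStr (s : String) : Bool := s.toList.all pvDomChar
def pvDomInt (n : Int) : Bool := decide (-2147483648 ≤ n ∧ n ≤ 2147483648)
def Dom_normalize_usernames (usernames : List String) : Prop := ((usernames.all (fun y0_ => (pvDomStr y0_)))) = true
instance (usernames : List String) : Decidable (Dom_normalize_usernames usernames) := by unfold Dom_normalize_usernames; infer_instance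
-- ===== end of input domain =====

-- B stages the work: first map-normalize-and-filter builds the whole name list, then a
-- separate nub loop (emit head, purge its later copies from the rest) deduplicates it —
-- no seen-set, no membership branch; alternative algorithm, same observable result (not faster).


-- ===== PORT A =====
-- shared helper: username.strip().lstrip("@").lower()
-- lstrip("@") is ported by hand as dropWhile (· == '@') (exact: left-strip of the single char '@')
def normalize_username (username : String) : String :=
  PySem.Str.lower (String.mk ((PySem.Str.strip username).toList.dropWhile (fun c => c == '@')))

-- loop body of A: if clean and clean not in seen: normalized.append(clean); seen.add(clean)
def pvStepA (st : List String × PySem.Set String) (username : String) : List String × PySem.Set String :=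
  let clean := normalize_username username
  if clean ≠ "" ∧ ¬ (PySem.Set.contains st.2 clean = true) then
    (st.1 ++ [clean], PySem.Set.add st.2 clean)
  else st

def normalize_usernames (usernames : List String) : List String :=
  (usernames.foldl pvStepA (([] : List String), (PySem.Set.empty : PySem.Set String))).1

-- ===== PORT B =====
-- B's while loop: emit the head, filter its copies out of the remainder
def pvNubLoop (out : List String) (names : List String) : List String :=
  match names with
  | [] => out
  | head :: rest => pvNubLoop (out ++ [head]) (rest.filter (fun n => n ≠ head))
termination_by names.length
decreasing_by
  simp only [List.length_cons, Nat.lt_succ_iff, List.length_unattach]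
  exact le_trans (List.length_filter_le _ _) (le_of_eq (List.length_attach))

def normalize_usernames_alt (usernames : List String) : List String :=
  pvNubLoop [] ((usernames.map normalize_username).filter (fun c => c ≠ ""))

-- ===== PRECONDITION & SPEC =====
def Spec_normalize_usernames (usernames : List String) (out : List String) : Prop := out = normalize_usernames_alt usernames
instance (usernames : List String) (out : List String) : Decidable (Spec_normalize_usernames usernames out) := by unfold Spec_normalize_usernames; infer_instance

-- ===== CLAIM (what is proved, stated in full; the proofs are below) =====
def Claim_equal_normalize_usernames : Prop := ∀ (usernames : List String), Dom_normalize_usernames usernames → Spec_normalize_usernames usernames (normalize_usernames usernames)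

-- ===== LEMMAS AND PROOFS =====

theorem pvNubLoop_nil (out : List String) : pvNubLoop out [] = out := by
  simp only [pvNubLoop]

theorem pvNubLoop_cons (out : List String) (head : String) (rest : List String) :
    pvNubLoop out (head :: rest) = pvNubLoop (out ++ [head]) (rest.filter (fun n => n ≠ head)) := by
  simp only [pvNubLoop]

-- extending the seen-set by one element = composing a fresh (≠ c) filter
theorem pvFilterExtend (c : String) (s : PySem.Set String) (l : List String) :
    l.filter (fun n => !(PySem.Set.contains (s ++ [c]) n))
      = (l.filter (fun n => !(PySem.Set.contains s n))).filter (fun n => n ≠ c) := by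
  rw [List.filter_filter]
  apply List.filter_congr
  intro n _
  by_cases hn : n = c <;> simp [PySem.Set.contains, hn]

-- A's loop from an equal (normalized, seen) pair = B's nub loop on the names not yet seen.
theorem pvLoopA (us : List String) (s : PySem.Set String) :
    (us.foldl pvStepA (s, s)).1
      = pvNubLoop s
          (((us.map normalize_username).filter (fun c => c ≠ "")).filter
            (fun n => !(PySem.Set.contains s n))) := by
  induction us generalizing s with
  | nil => simp [pvNubLoop_nil]
  | cons u rest ih =>
    by_cases hc : normalize_username u = ""
    · have hstep : pvStepA (s, s) u = (s, s) := by simp [pvStepA, hc]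
      simp only [List.foldl_cons, hstep, List.map_cons, List.filter_cons, hc]
      simpa using ih s
    · have hd : decide (normalize_username u ≠ "") = true := by simp [hc]
      by_cases hm : PySem.Set.contains s (normalize_username u) = true
      · have hstep : pvStepA (s, s) u = (s, s) := by
          simp only [pvStepA]
          rw [if_neg (fun h => h.2 hm)]
        simp only [List.foldl_cons, hstep, List.map_cons, List.filter_cons, hd, if_true, hm,
          Bool.not_true]
        exact ih s
      · have hmem : normalize_username u ∉ s := by
          simpa [PySem.Set.contains] using hm
        have hadd : PySem.Set.add s (normalize_username u) = s ++ [normalize_username u] :=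
          PySem.Set.add_of_not_mem hmem
        have hstep : pvStepA (s, s) u
            = (s ++ [normalize_username u], s ++ [normalize_username u]) := by
          simp only [pvStepA]
          rw [if_pos ⟨hc, hm⟩, hadd]
        have hnot : (!(PySem.Set.contains s (normalize_username u))) = true := by
          simpa [PySem.Set.contains] using hmem
        simp only [List.foldl_cons, hstep, List.map_cons, List.filter_cons, hd, if_true, hnot]
        rw [ih (s ++ [normalize_username u]), pvFilterExtend, pvNubLoop_cons]

-- ===== VERDICT (by name: the statement is the Claim_ definition above) =====
theorem normalize_usernames_spec : Claim_equal_normalize_usernames := by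
  intro usernames _
  unfold Spec_normalize_usernames normalize_usernames normalize_usernames_alt
  rw [show (PySem.Set.empty : PySem.Set String) = ([] : List String) from rfl]
  rw [pvLoopA]
  congr 1
  simp [PySem.Set.contains]
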